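-- pv_equiv track=rewrite | github.com/harshit1tewari/Secure-Spam-Protected-P2P-Messaging-Platform | secure.py | des_encrypt
-- ===== SOURCE A (Python) =====
-- IP = [58, 50, 42, 34, 26, 18, 10, 2,
--       60, 52, 44, 36, 28, 20, 12, 4,
--       62, 54, 46, 38, 30, 22, 14, 6,
--       64, 56, 48, 40, 32, 24, 16, 8,
--       57, 49, 41, 33, 25, 17, 9, 1,
--       59, 51, 43, 35, 27, 19, 11, 3,
--       61, 53, 45, 37, 29, 21, 13, 5,
--       63, 55, 47, 39, 31, 23, 15, 7]
--
-- FP = [40, 8, 48, 16, 56, 24, 64, 32,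
--       39, 7, 47, 15, 55, 23, 63, 31,
--       38, 6, 46, 14, 54, 22, 62, 30,
--       37, 5, 45, 13, 53, 21, 61, 29,
--       36, 4, 44, 12, 52, 20, 60, 28,
--       35, 3, 43, 11, 51, 19, 59, 27,
--       34, 2, 42, 10, 50, 18, 58, 26,
--       33, 1, 41, 9, 49, 17, 57, 25]
--
-- E = [32, 1, 2, 3, 4, 5,
--      4, 5, 6, 7, 8, 9,
--      8, 9, 10, 11, 12, 13,
--      12, 13, 14, 15, 16, 17,
--      16, 17, 18, 19, 20, 21,
--      20, 21, 22, 23, 24, 25,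
--      24, 25, 26, 27, 28, 29,
--      28, 29, 30, 31, 32, 1]
--
-- P = [16, 7, 20, 21, 29, 12, 28, 17,
--      1, 15, 23, 26, 5, 18, 31, 10,
--      2, 8, 24, 14, 32, 27, 3, 9,
--      19, 13, 30, 6, 22, 11, 4, 25]
--
-- S_BOXES = [
--     [
--         [14, 4, 13, 1, 2, 15, 11, 8, 3, 10, 6, 12, 5, 9, 0, 7],
--         [0, 15, 7, 4, 14, 2, 13, 1, 10, 6, 12, 11, 9, 5, 3, 8],
--         [4, 1, 14, 8, 13, 6, 2, 11, 15, 12, 9, 7, 3, 10, 5, 0],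
--         [15, 12, 8, 2, 4, 9, 1, 7, 5, 11, 3, 14, 10, 0, 6, 13]
--     ],
-- ] * 8  # Repeat for simplicity
--
-- def string_to_bin(text):
--     return ''.join(f'{ord(c):08b}' for c in text.ljust(8))
--
-- def permute(block, table):
--     return ''.join(block[i - 1] for i in table)
--
-- def xor(a, b):
--     return ''.join('0' if i == j else '1' for i, j in zip(a, b))
--
-- def sbox_substitution(bits):
--     result = ''
--     for i in range(8):
--         block = bits[i * 6:(i + 1) * 6]
--         row = int(block[0] + block[5], 2)
--         col = int(block[1:5], 2)
--         val = S_BOXES[i][row][col]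
--         result += f'{val:04b}'
--     return result
--
-- def feistel(right, subkey):
--     expanded = permute(right, E)
--     xored = xor(expanded, subkey)
--     substituted = sbox_substitution(xored)
--     return permute(substituted, P)
--
-- def key_schedule(key):
--     return [key] * 16  # Simple repetition
--
-- def des_encrypt_block(plain_bin, key_bin):
--     perm = permute(plain_bin, IP)
--     left, right = perm[:32], perm[32:]
--     keys = key_schedule(key_bin)
--
--     for i in range(16):
--         temp = right
--         right = xor(left, feistel(right, keys[i]))
--         left = temp
--
--     return permute(right + left, FP)
--
-- def pad(text):
--     pad_len = 8 - (len(text) % 8)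
--     return text + chr(pad_len) * pad_len
--
-- def des_encrypt(text, key):
--     text = pad(text)
--     key_bin = string_to_bin(key[:8])
--     result = ''
--     for i in range(0, len(text), 8):
--         block = text[i:i + 8]
--         block_bin = string_to_bin(block)
--         encrypted_bin = des_encrypt_block(block_bin, key_bin)
--         result += f'{int(encrypted_bin, 2):016x}'
--     return result
-- ===== SOURCE B (Python) =====
-- # Integer-based re-implementation: each 64/48/32-bit value is a Python int,
-- # permutation/xor/S-box work with shifts and masks instead of '01' strings.
--
-- IP = [58, 50, 42, 34, 26, 18, 10, 2,
--       60, 52, 44, 36, 28, 20, 12, 4,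
--       62, 54, 46, 38, 30, 22, 14, 6,
--       64, 56, 48, 40, 32, 24, 16, 8,
--       57, 49, 41, 33, 25, 17, 9, 1,
--       59, 51, 43, 35, 27, 19, 11, 3,
--       61, 53, 45, 37, 29, 21, 13, 5,
--       63, 55, 47, 39, 31, 23, 15, 7]
--
-- FP = [40, 8, 48, 16, 56, 24, 64, 32,
--       39, 7, 47, 15, 55, 23, 63, 31,
--       38, 6, 46, 14, 54, 22, 62, 30,
--       37, 5, 45, 13, 53, 21, 61, 29,
--       36, 4, 44, 12, 52, 20, 60, 28,
--       35, 3, 43, 11, 51, 19, 59, 27,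
--       34, 2, 42, 10, 50, 18, 58, 26,
--       33, 1, 41, 9, 49, 17, 57, 25]
--
-- E = [32, 1, 2, 3, 4, 5,
--      4, 5, 6, 7, 8, 9,
--      8, 9, 10, 11, 12, 13,
--      12, 13, 14, 15, 16, 17,
--      16, 17, 18, 19, 20, 21,
--      20, 21, 22, 23, 24, 25,
--      24, 25, 26, 27, 28, 29,
--      28, 29, 30, 31, 32, 1]
--
-- P = [16, 7, 20, 21, 29, 12, 28, 17,
--      1, 15, 23, 26, 5, 18, 31, 10,
--      2, 8, 24, 14, 32, 27, 3, 9,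
--      19, 13, 30, 6, 22, 11, 4, 25]
--
-- S_BOXES = [
--     [
--         [14, 4, 13, 1, 2, 15, 11, 8, 3, 10, 6, 12, 5, 9, 0, 7],
--         [0, 15, 7, 4, 14, 2, 13, 1, 10, 6, 12, 11, 9, 5, 3, 8],
--         [4, 1, 14, 8, 13, 6, 2, 11, 15, 12, 9, 7, 3, 10, 5, 0],
--         [15, 12, 8, 2, 4, 9, 1, 7, 5, 11, 3, 14, 10, 0, 6, 13]
--     ],
-- ] * 8
--
--
-- def _permute(v, width, table):
--     out = 0
--     for pos in table:
--         out = out * 2 + ((v >> (width - pos)) & 1)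
--     return out
--
--
-- def _sbox(x):
--     out = 0
--     for i in range(8):
--         six = (x >> (42 - 6 * i)) & 63
--         row = ((six >> 5) & 1) * 2 + (six & 1)
--         col = (six >> 1) & 15
--         out = out * 16 + S_BOXES[i][row][col]
--     return out
--
--
-- def _feistel(r, subkey):
--     return _permute(_sbox(_permute(r, 32, E) ^ subkey), 32, P)
--
--
-- def des_encrypt(text, key):
--     pad_len = 8 - len(text) % 8
--     text = text + chr(pad_len) * pad_len
--     kb = 0
--     for c in key[:8].ljust(8):
--         kb = kb * 256 + ord(c)
--     # the reference xors the 48-bit expansion against the 64-bit key and zip()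
--     # truncates, so the effective round subkey is the key's top 48 bits
--     subkey = kb >> 16
--     out = []
--     while text:
--         block, text = text[:8], text[8:]
--         v = 0
--         for c in block:
--             v = v * 256 + ord(c)
--         v = _permute(v, 64, IP)
--         l, r = v >> 32, v & 0xFFFFFFFF
--         for _ in range(16):
--             l, r = r, l ^ _feistel(r, subkey)
--         out.append('%016x' % _permute(r * 2 ** 32 + l, 64, FP))
--     return ''.join(out)
-- ===== Notes on version B (the rewrite author's own statement) =====
-- stated objective: faster
-- what changed: B replaces A's '01'-string representation of every 64/48/32-bit value with machine integers: permutation, XOR and S-box lookup become shift/mask arithmetic, the 16 identical round subkeys collapse into one precomputed 48-bit integer, and blocks are packed/emitted as ints instead of per-bit string joins.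
import Mathlib
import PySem

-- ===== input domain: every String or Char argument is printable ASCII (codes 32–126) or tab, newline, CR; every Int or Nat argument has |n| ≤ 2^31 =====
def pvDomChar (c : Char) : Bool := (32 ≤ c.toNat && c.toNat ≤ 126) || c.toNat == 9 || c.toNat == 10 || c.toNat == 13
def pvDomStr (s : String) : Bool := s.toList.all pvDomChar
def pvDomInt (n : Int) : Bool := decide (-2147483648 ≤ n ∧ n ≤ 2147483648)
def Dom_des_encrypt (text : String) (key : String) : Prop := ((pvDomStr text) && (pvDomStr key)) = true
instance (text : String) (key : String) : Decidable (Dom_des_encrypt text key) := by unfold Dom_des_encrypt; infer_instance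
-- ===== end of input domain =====

-- B re-implements the same (toy) DES on machine integers with shifts and masks
-- instead of '01' strings; equal return value on the whole ASCII domain.

-- shared constant tables (identical literals in both sources)
def pvIP : List Nat := [58, 50, 42, 34, 26, 18, 10, 2,
  60, 52, 44, 36, 28, 20, 12, 4,
  62, 54, 46, 38, 30, 22, 14, 6,
  64, 56, 48, 40, 32, 24, 16, 8,
  57, 49, 41, 33, 25, 17, 9, 1,
  59, 51, 43, 35, 27, 19, 11, 3,
  61, 53, 45, 37, 29, 21, 13, 5,
  63, 55, 47, 39, 31, 23, 15, 7]

def pvFP : List Nat := [40, 8, 48, 16, 56, 24, 64, 32,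
  39, 7, 47, 15, 55, 23, 63, 31,
  38, 6, 46, 14, 54, 22, 62, 30,
  37, 5, 45, 13, 53, 21, 61, 29,
  36, 4, 44, 12, 52, 20, 60, 28,
  35, 3, 43, 11, 51, 19, 59, 27,
  34, 2, 42, 10, 50, 18, 58, 26,
  33, 1, 41, 9, 49, 17, 57, 25]

def pvE : List Nat := [32, 1, 2, 3, 4, 5,
  4, 5, 6, 7, 8, 9,
  8, 9, 10, 11, 12, 13,
  12, 13, 14, 15, 16, 17,
  16, 17, 18, 19, 20, 21,
  20, 21, 22, 23, 24, 25,
  24, 25, 26, 27, 28, 29,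
  28, 29, 30, 31, 32, 1]

def pvP : List Nat := [16, 7, 20, 21, 29, 12, 28, 17,
  1, 15, 23, 26, 5, 18, 31, 10,
  2, 8, 24, 14, 32, 27, 3, 9,
  19, 13, 30, 6, 22, 11, 4, 25]

def pvSBox0 : List (List Nat) :=
  [[14, 4, 13, 1, 2, 15, 11, 8, 3, 10, 6, 12, 5, 9, 0, 7],
   [0, 15, 7, 4, 14, 2, 13, 1, 10, 6, 12, 11, 9, 5, 3, 8],
   [4, 1, 14, 8, 13, 6, 2, 11, 15, 12, 9, 7, 3, 10, 5, 0],
   [15, 12, 8, 2, 4, 9, 1, 7, 5, 11, 3, 14, 10, 0, 6, 13]]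

def pvSBoxes : List (List (List Nat)) := List.replicate 8 pvSBox0   -- [box] * 8

-- hand ports of Python's number formatting (exact): minimal digits, MSB first
def pvBinDigits : Nat → List Char
  | 0 => []
  | v + 1 => pvBinDigits ((v + 1) / 2) ++ [if (v + 1) % 2 == 1 then '1' else '0']
decreasing_by omega

-- f'{v:0wb}' : minimal binary digits, left-padded with '0' to width w (exact for every v)
def pvBinFmt (w v : Nat) : List Char :=
  let s := if v = 0 then ['0'] else pvBinDigits v
  List.replicate (w - s.length) '0' ++ s

def pvHexDigit (d : Nat) : Char := ("0123456789abcdef".toList).getD d '0'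

def pvHexDigits : Nat → List Char
  | 0 => []
  | v + 1 => pvHexDigits ((v + 1) / 16) ++ [pvHexDigit ((v + 1) % 16)]
decreasing_by omega

-- '%016x' : minimal lowercase hex digits, left-padded with '0' to width 16 (exact; shared literal formatting in both sources)
def pvHex16 (v : Nat) : List Char :=
  let s := if v = 0 then ['0'] else pvHexDigits v
  List.replicate (16 - s.length) '0' ++ s

-- ===== PORT A =====

-- text.ljust(8) (exact: pads with spaces on the right up to length 8)
def pvLjust8 (t : List Char) : List Char := t ++ List.replicate (8 - t.length) ' '

def pvStrToBin (t : List Char) : List Char :=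
  ((pvLjust8 t).map (fun c => pvBinFmt 8 c.toNat)).flatten

-- block[i-1]: in every call i-1 is in range, so getD is exact
def pvPermuteA (block : List Char) (table : List Nat) : List Char :=
  table.map (fun i => block.getD (i - 1) '0')

def pvXorA (a b : List Char) : List Char :=
  (a.zip b).map (fun p => if p.1 == p.2 then '0' else '1')

-- int(s, 2): exact on strings of '0'/'1' (the only strings it is applied to)
def pvBinVal (s : List Char) : Nat :=
  s.foldl (fun acc c => 2 * acc + (if c == '1' then 1 else 0)) 0

def pvSboxSubA (bits : List Char) : List Char :=
  (List.range 8).foldl (fun result i =>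
    let block := (bits.drop (i * 6)).take 6
    let row := pvBinVal [block.getD 0 '0', block.getD 5 '0']
    let col := pvBinVal ((block.drop 1).take 4)
    let v := ((pvSBoxes.getD i []).getD row []).getD col 0
    result ++ pvBinFmt 4 v) []

def pvFeistelA (right subkey : List Char) : List Char :=
  pvPermuteA (pvSboxSubA (pvXorA (pvPermuteA right pvE) subkey)) pvP

def pvKeySchedule (k : List Char) : List (List Char) := List.replicate 16 k

def pvEncBlockA (plain kb : List Char) : List Char :=
  let perm := pvPermuteA plain pvIP
  let keys := pvKeySchedule kb
  let lr := (List.range 16).foldl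
    (fun (lr : List Char × List Char) i =>
      (lr.2, pvXorA lr.1 (pvFeistelA lr.2 (keys.getD i []))))
    (perm.take 32, perm.drop 32)
  pvPermuteA (lr.2 ++ lr.1) pvFP

def pvPadA (t : List Char) : List Char :=
  t ++ List.replicate (8 - t.length % 8) (Char.ofNat (8 - t.length % 8))

def des_encrypt (text : String) (key : String) : String :=
  let t := pvPadA text.toList
  let kb := pvStrToBin (key.toList.take 8)
  String.ofList ((PySem.List.pyRange 0 (t.length : Int) 8).foldl
    (fun res i =>
      res ++ pvHex16 (pvBinVal (pvEncBlockA (pvStrToBin ((t.drop i.toNat).take 8)) kb))) [])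

-- ===== PORT B =====

def pvPermI (v w : Nat) (table : List Nat) : Nat :=
  table.foldl (fun out p => out * 2 + ((v >>> (w - p)) &&& 1)) 0

def pvSboxI (x : Nat) : Nat :=
  (List.range 8).foldl (fun out i =>
    let six := (x >>> (42 - 6 * i)) &&& 63
    let row := ((six >>> 5) &&& 1) * 2 + (six &&& 1)
    let col := (six >>> 1) &&& 15
    out * 16 + ((pvSBoxes.getD i []).getD row []).getD col 0) 0

def pvFeistelI (r subkey : Nat) : Nat :=
  pvPermI (pvSboxI (pvPermI r 32 pvE ^^^ subkey)) 32 pvP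

def pvPack (cs : List Char) : Nat :=
  cs.foldl (fun acc c => acc * 256 + c.toNat) 0

def pvAltBlock (v subkey : Nat) : Nat :=
  let v := pvPermI v 64 pvIP
  let lr := (List.range 16).foldl
    (fun (lr : Nat × Nat) _ => (lr.2, lr.1 ^^^ pvFeistelI lr.2 subkey))
    (v >>> 32, v &&& 0xFFFFFFFF)
  pvPermI (lr.2 * 2 ^ 32 + lr.1) 64 pvFP

-- 'while text: block, text = text[:8], text[8:]; out.append(…)' + ''.join(out)
def pvAltLoop (t : List Char) (subkey : Nat) : List Char :=
  match t with
  | [] => []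
  | c :: rest =>
    pvHex16 (pvAltBlock (pvPack ((c :: rest).take 8)) subkey)
      ++ pvAltLoop ((c :: rest).drop 8) subkey
termination_by t.length
decreasing_by simp

def des_encrypt_alt (text : String) (key : String) : String :=
  let padLen := 8 - text.toList.length % 8
  let t := text.toList ++ List.replicate padLen (Char.ofNat padLen)
  let k8 := key.toList.take 8
  let kb := pvPack (k8 ++ List.replicate (8 - k8.length) ' ')
  String.ofList (pvAltLoop t (kb >>> 16))

-- ===== PRECONDITION & SPEC =====
def Spec_des_encrypt (text : String) (key : String) (out : String) : Prop := out = des_encrypt_alt text key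
instance (text : String) (key : String) (out : String) : Decidable (Spec_des_encrypt text key out) := by unfold Spec_des_encrypt; infer_instance

-- ===== CLAIM (what is proved, stated in full; the proofs are below) =====
def Claim_equal_des_encrypt : Prop := ∀ (text : String) (key : String), Dom_des_encrypt text key → Spec_des_encrypt text key (des_encrypt text key)

-- ===== LEMMAS AND PROOFS =====

-- the MSB-first string of the low w bits of v
def pvBits : Nat → Nat → List Char
  | 0, _ => []
  | w + 1, v => pvBits w (v / 2) ++ [if v % 2 == 1 then '1' else '0']

theorem pvBits_length (w v : Nat) : (pvBits w v).length = w := by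
  induction w generalizing v with
  | zero => rfl
  | succ w ih => simp [pvBits, ih]

theorem pvBits_mod (w v : Nat) : pvBits w (v % 2 ^ w) = pvBits w v := by
  induction w generalizing v with
  | zero => rfl
  | succ w ih =>
    have h1 : v % 2 ^ (w + 1) % 2 = v % 2 :=
      Nat.mod_mod_of_dvd v (dvd_pow_self 2 (Nat.succ_ne_zero w))
    have h2 : v % 2 ^ (w + 1) / 2 = v / 2 % 2 ^ w := by
      rw [pow_succ, Nat.mul_comm, Nat.mod_mul_right_div_self]
    simp [pvBits, h1, h2, ih]

theorem pvBits_append (w1 w2 a b : Nat) (hb : b < 2 ^ w2) :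
    pvBits (w1 + w2) (a * 2 ^ w2 + b) = pvBits w1 a ++ pvBits w2 b := by
  induction w2 generalizing b with
  | zero =>
    interval_cases b
    simp [pvBits]
  | succ w2 ih =>
    have hd : (a * 2 ^ (w2 + 1) + b) / 2 = a * 2 ^ w2 + b / 2 := by
      rw [pow_succ, ← Nat.mul_assoc]; omega
    have hm : (a * 2 ^ (w2 + 1) + b) % 2 = b % 2 := by
      rw [pow_succ, ← Nat.mul_assoc]; omega
    have hb' : b / 2 < 2 ^ w2 := by rw [pow_succ] at hb; omega
    rw [show w1 + (w2 + 1) = (w1 + w2) + 1 from rfl]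
    simp [pvBits, hd, hm, ih _ hb']

theorem pvBinVal_bits_aux (w v a : Nat) :
    (pvBits w v).foldl (fun acc c => 2 * acc + (if c == '1' then 1 else 0)) a
      = a * 2 ^ w + v % 2 ^ w := by
  induction w generalizing v a with
  | zero => simp [pvBits, Nat.mod_one]
  | succ w ih =>
    rw [pvBits, List.foldl_append, ih]
    have h : (if (if v % 2 == 1 then '1' else '0') == '1' then 1 else 0) = v % 2 := by
      rcases Nat.mod_two_eq_zero_or_one v with h | h <;> simp [h]
    simp only [List.foldl, h, pow_succ, ← Nat.mul_assoc]
    have h2 : v / 2 % 2 ^ w = v % (2 ^ w * 2) / 2 := by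
      rw [Nat.mul_comm, Nat.mod_mul_right_div_self]
    have h3 : v % (2 ^ w * 2) % 2 = v % 2 :=
      Nat.mod_mod_of_dvd v ⟨2 ^ w, Nat.mul_comm (2 ^ w) 2⟩
    rw [h2]
    omega

theorem pvBinVal_bits (w v : Nat) : pvBinVal (pvBits w v) = v % 2 ^ w := by
  have := pvBinVal_bits_aux w v 0
  simpa [pvBinVal] using this

theorem pvBits_zero (w : Nat) : pvBits w 0 = List.replicate w '0' := by
  induction w with
  | zero => rfl
  | succ w ih => simp [pvBits, ih, List.replicate_succ']

theorem pvBits_eq_binDigits (w v : Nat) (hv : v ≠ 0) (h : v < 2 ^ w) :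
    pvBits w v = List.replicate (w - (pvBinDigits v).length) '0' ++ pvBinDigits v := by
  induction w generalizing v with
  | zero => simp at h; omega
  | succ w ih =>
    rcases v with _ | u
    · omega
    rw [pvBits, pvBinDigits]
    rcases Nat.eq_zero_or_pos ((u + 1) / 2) with h0 | h0
    · have hu : u = 0 := by omega
      subst hu
      simp [pvBits_zero, pvBinDigits]
    · have hlt : (u + 1) / 2 < 2 ^ w := by
        rw [pow_succ] at h; omega
      rw [ih _ (by omega) hlt, List.append_assoc]
      simp

theorem pvBinFmt_eq (w v : Nat) (hw : 1 ≤ w) (h : v < 2 ^ w) :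
    pvBinFmt w v = pvBits w v := by
  unfold pvBinFmt
  rcases Nat.eq_zero_or_pos v with h0 | h0
  · subst h0
    simp [pvBits_zero]
    have hrep : List.replicate w '0' = List.replicate (w - 1) '0' ++ ['0'] := by
      rw [← List.replicate_succ', show w - 1 + 1 = w from by omega]
    rw [hrep]
  · rw [if_neg (by omega), pvBits_eq_binDigits w v (by omega) h]

theorem pvBinFmt8_eq (v : Nat) (h : v < 256) : pvBinFmt 8 v = pvBits 8 v :=
  pvBinFmt_eq 8 v (by norm_num) h

theorem pvBinFmt4_eq (v : Nat) (h : v < 16) : pvBinFmt 4 v = pvBits 4 v :=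
  pvBinFmt_eq 4 v (by norm_num) h

theorem pvBits_take (w m v : Nat) (h : m ≤ w) :
    (pvBits w v).take m = pvBits m (v >>> (w - m)) := by
  induction w generalizing m v with
  | zero => interval_cases m; rfl
  | succ w ih =>
    rcases Nat.lt_or_ge m (w + 1) with hm | hm
    · have hm' : m ≤ w := by omega
      rw [pvBits, List.take_append_of_le_length (by simp [pvBits_length]; omega), ih _ _ hm']
      congr 1
      rw [show w + 1 - m = (w - m) + 1 by omega]
      rw [Nat.add_comm (w - m) 1, Nat.shiftRight_add, Nat.shiftRight_one]
    · have : m = w + 1 := by omega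
      subst this
      rw [List.take_of_length_le (by simp [pvBits_length])]
      simp

theorem pvBits_drop (w m v : Nat) (h : m ≤ w) :
    (pvBits w v).drop m = pvBits (w - m) v := by
  induction w generalizing m v with
  | zero => interval_cases m; rfl
  | succ w ih =>
    rcases Nat.lt_or_ge m (w + 1) with hm | hm
    · have hm' : m ≤ w := by omega
      rw [pvBits, List.drop_append_of_le_length (by simp [pvBits_length]; omega), ih _ _ hm']
      rw [show w + 1 - m = (w - m) + 1 by omega]
      rfl
    · have : m = w + 1 := by omega
      subst this
      rw [List.drop_of_length_le (by simp [pvBits_length])]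
      simp [pvBits]

theorem pvBits_getD (w p v : Nat) (h1 : 1 ≤ p) (h2 : p ≤ w) :
    (pvBits w v).getD (p - 1) '0'
      = (if (v >>> (w - p)) % 2 == 1 then '1' else '0') := by
  induction w generalizing v with
  | zero => omega
  | succ w ih =>
    rcases Nat.lt_or_ge p (w + 1) with hp | hp
    · have hp' : p ≤ w := by omega
      rw [pvBits, List.getD_append _ _ _ _ (by simp [pvBits_length]; omega), ih _ hp']
      congr 2
      rw [show w + 1 - p = (w - p) + 1 by omega,
          Nat.add_comm (w - p) 1, Nat.shiftRight_add, Nat.shiftRight_one]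
    · have : p = w + 1 := by omega
      subst this
      rw [pvBits]
      rw [List.getD_eq_getElem?_getD, List.getElem?_append_right (by simp [pvBits_length])]
      simp [pvBits_length]

-- generic paired fold over List.range with an index-dependent invariant
theorem pvFoldlRangeRel {α β : Type} (n : Nat) (R : Nat → α → β → Prop)
    (f : α → Nat → α) (g : β → Nat → β) (a0 : α) (b0 : β)
    (h0 : R 0 a0 b0)
    (hstep : ∀ i a b, i < n → R i a b → R (i + 1) (f a i) (g b i)) :
    R n ((List.range n).foldl f a0) ((List.range n).foldl g b0) := by
  induction n with
  | zero => simpa using h0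
  | succ n ih =>
    rw [List.range_succ, List.foldl_append, List.foldl_append]
    exact hstep n _ _ (Nat.lt_succ_self n)
      (ih (fun i a b hi => hstep i a b (Nat.lt_succ_of_lt hi)))

theorem pvPermI_lt_aux (v w : Nat) (table : List Nat) (a n : Nat) (ha : a < 2 ^ n) :
    table.foldl (fun out p => out * 2 + ((v >>> (w - p)) &&& 1)) a < 2 ^ (n + table.length) := by
  induction table generalizing a n with
  | nil => simpa using ha
  | cons p t ih =>
    have hbit : (v >>> (w - p)) &&& 1 < 2 := by
      rw [Nat.and_one_is_mod]; omega
    have : a * 2 + ((v >>> (w - p)) &&& 1) < 2 ^ (n + 1) := by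
      rw [pow_succ]; omega
    have h := ih _ (n + 1) this
    rw [show n + 1 + t.length = n + (t.length + 1) from by omega] at h
    simpa using h

theorem pvPermI_lt (v w : Nat) (table : List Nat) :
    pvPermI v w table < 2 ^ table.length := by
  simpa [pvPermI] using pvPermI_lt_aux v w table 0 0 (by norm_num)

theorem pvPermute_bridge_aux (v w : Nat) (table : List Nat)
    (hT : ∀ p ∈ table, 1 ≤ p ∧ p ≤ w) (a n : Nat) (ha : a < 2 ^ n) :
    pvBits (n + table.length) (table.foldl (fun out p => out * 2 + ((v >>> (w - p)) &&& 1)) a)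
      = pvBits n a ++ table.map (fun p => (pvBits w v).getD (p - 1) '0') := by
  induction table generalizing a n with
  | nil => simp
  | cons p t ih =>
    have hp := hT p (List.mem_cons_self ..)
    have hbit : (v >>> (w - p)) &&& 1 < 2 := by rw [Nat.and_one_is_mod]; omega
    have ha' : a * 2 + ((v >>> (w - p)) &&& 1) < 2 ^ (n + 1) := by rw [pow_succ]; omega
    have hstep : pvBits (n + 1) (a * 2 + ((v >>> (w - p)) &&& 1))
        = pvBits n a ++ [(pvBits w v).getD (p - 1) '0'] := by
      rw [pvBits]
      have hd : (a * 2 + ((v >>> (w - p)) &&& 1)) / 2 = a := by omega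
      have hm : (a * 2 + ((v >>> (w - p)) &&& 1)) % 2 = (v >>> (w - p)) &&& 1 := by omega
      rw [hd, hm, pvBits_getD w p v hp.1 hp.2]
      rw [Nat.and_one_is_mod]
    calc pvBits (n + (p :: t).length)
          ((p :: t).foldl (fun out q => out * 2 + ((v >>> (w - q)) &&& 1)) a)
        = pvBits ((n + 1) + t.length)
          (t.foldl (fun out q => out * 2 + ((v >>> (w - q)) &&& 1))
            (a * 2 + ((v >>> (w - p)) &&& 1))) := by
          simp only [List.foldl_cons, List.length_cons,
            show n + (t.length + 1) = n + 1 + t.length from by omega]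
      _ = pvBits (n + 1) (a * 2 + ((v >>> (w - p)) &&& 1))
            ++ t.map (fun q => (pvBits w v).getD (q - 1) '0') := by
          exact ih (fun q hq => hT q (List.mem_cons_of_mem _ hq)) _ _ ha'
      _ = pvBits n a ++ (p :: t).map (fun q => (pvBits w v).getD (q - 1) '0') := by
          rw [hstep]; simp

theorem pvPermute_bridge (v w : Nat) (table : List Nat)
    (hT : ∀ p ∈ table, 1 ≤ p ∧ p ≤ w) :
    pvPermuteA (pvBits w v) table = pvBits table.length (pvPermI v w table) := by
  have := pvPermute_bridge_aux v w table hT 0 0 (by norm_num)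
  simpa [pvPermuteA, pvPermI] using this.symm

theorem pvZip_take_left {α β : Type} (a : List α) (b : List β) (h : a.length ≤ b.length) :
    a.zip b = a.zip (b.take a.length) := by
  induction a generalizing b with
  | nil => simp
  | cons x xs ih =>
    cases b with
    | nil => simp at h
    | cons y ys =>
      simp only [List.length_cons, List.take_succ_cons, List.zip_cons_cons]
      rw [← ih ys (by simpa using h)]

theorem pvXorA_snoc (A B : List Char) (x y : Char) (h : A.length = B.length) :
    pvXorA (A ++ [x]) (B ++ [y]) = pvXorA A B ++ [if x == y then '0' else '1'] := by
  simp [pvXorA, List.zip_append h]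

theorem pvXor_bridge (w a b : Nat) :
    pvXorA (pvBits w a) (pvBits w b) = pvBits w (a ^^^ b) := by
  induction w generalizing a b with
  | zero => rfl
  | succ w ih =>
    rw [pvBits, pvBits, pvBits,
      pvXorA_snoc _ _ _ _ (by simp [pvBits_length]), ih, Nat.xor_div_two]
    congr 1
    have hx : (a ^^^ b) % 2 = a % 2 ^^^ b % 2 := by
      have := @Nat.xor_mod_two_pow a b 1
      simpa using this
    rcases Nat.mod_two_eq_zero_or_one a with h1 | h1 <;>
      rcases Nat.mod_two_eq_zero_or_one b with h2 | h2 <;>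
        simp [hx, h1, h2]

theorem pvGetD_lt (l : List Nat) (c bnd : Nat) (hb : 0 < bnd) (h : ∀ x ∈ l, x < bnd) :
    l.getD c 0 < bnd := by
  rcases Nat.lt_or_ge c l.length with hc | hc
  · rw [List.getD_eq_getElem l 0 hc]
    exact h _ (List.getElem_mem hc)
  · rw [List.getD_eq_default l 0 hc]
    exact hb

theorem pvTableBound (table : List Nat) (w : Nat)
    (h : table.all (fun p => 1 ≤ p && p ≤ w) = true) : ∀ p ∈ table, 1 ≤ p ∧ p ≤ w := by
  intro p hp
  have := List.all_eq_true.mp h p hp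
  simp at this
  exact this

theorem pvSval_lt (i r c : Nat) : ((pvSBoxes.getD i []).getD r []).getD c 0 < 16 := by
  have hb : pvSBoxes.getD i [] = pvSBox0 ∨ pvSBoxes.getD i [] = [] := by
    rcases Nat.lt_or_ge i 8 with h | h
    · exact Or.inl (by rw [pvSBoxes]; exact List.getD_replicate _ h)
    · exact Or.inr (by rw [pvSBoxes]; exact List.getD_eq_default _ _ (by simpa using h))
  have hrow : ∀ (l : List (List Nat)), (∀ row ∈ l, ∀ x ∈ row, x < 16) →
      ∀ r c, (l.getD r []).getD c 0 < 16 := by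
    intro l hl r c
    apply pvGetD_lt _ _ _ (by norm_num)
    intro x hx
    rcases Nat.lt_or_ge r l.length with hr | hr
    · rw [List.getD_eq_getElem l [] hr] at hx
      exact hl _ (List.getElem_mem hr) x hx
    · rw [List.getD_eq_default l [] hr] at hx
      simp at hx
  rcases hb with h | h <;> rw [h]
  · refine hrow pvSBox0 ?_ r c
    have hall : pvSBox0.all (fun row => row.all (fun x => x < 16)) = true := by rfl
    intro row hrmem x hx
    have h1 := List.all_eq_true.mp hall row hrmem
    have h2 := List.all_eq_true.mp h1 x hx
    simpa using h2
  · exact hrow [] (by simp) r c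

theorem pvPermI_lt' (v w n : Nat) (table : List Nat) (h : table.length = n) :
    pvPermI v w table < 2 ^ n := h ▸ pvPermI_lt v w table

theorem pvPermute_bridge' (v w n : Nat) (table : List Nat)
    (hT : ∀ p ∈ table, 1 ≤ p ∧ p ≤ w) (hn : table.length = n) :
    pvPermuteA (pvBits w v) table = pvBits n (pvPermI v w table) :=
  hn ▸ pvPermute_bridge v w table hT

theorem pvSbox_bridge (x : Nat) :
    pvSboxSubA (pvBits 48 x) = pvBits 32 (pvSboxI x) ∧ pvSboxI x < 2 ^ 32 := by
  unfold pvSboxSubA pvSboxI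
  refine pvFoldlRangeRel 8
    (fun i (sa : List Char) (sb : Nat) => sa = pvBits (4 * i) sb ∧ sb < 2 ^ (4 * i))
    _ _ [] 0 ⟨rfl, by norm_num⟩ ?_
  intro i a b hi h
  obtain ⟨hab, hb⟩ := h
  dsimp only
  set six := (x >>> (42 - 6 * i)) &&& 63 with hsixdef
  have hsix_mod : six = (x >>> (42 - 6 * i)) % 64 := by
    rw [hsixdef]
    have := Nat.and_two_pow_sub_one_eq_mod (x >>> (42 - 6 * i)) 6
    norm_num at this
    exact this
  have hblock : ((pvBits 48 x).drop (i * 6)).take 6 = pvBits 6 six := by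
    rw [pvBits_drop 48 (i * 6) x (by omega), pvBits_take (48 - i * 6) 6 x (by omega)]
    rw [show 48 - i * 6 - 6 = 42 - 6 * i from by omega]
    rw [hsix_mod, show (64 : Nat) = 2 ^ 6 from by norm_num, pvBits_mod]
  have hg0 : (pvBits 6 six).getD 0 '0' = (if (six >>> 5) % 2 == 1 then '1' else '0') := by
    have := pvBits_getD 6 1 six (by norm_num) (by norm_num)
    simpa using this
  have hg5 : (pvBits 6 six).getD 5 '0' = (if six % 2 == 1 then '1' else '0') := by
    have := pvBits_getD 6 6 six (by norm_num) (by norm_num)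
    simpa using this
  have hrow : pvBinVal [(pvBits 6 six).getD 0 '0', (pvBits 6 six).getD 5 '0']
      = ((six >>> 5) &&& 1) * 2 + (six &&& 1) := by
    rw [hg0, hg5, Nat.and_one_is_mod, Nat.and_one_is_mod]
    rcases Nat.mod_two_eq_zero_or_one (six >>> 5) with h1 | h1 <;>
      rcases Nat.mod_two_eq_zero_or_one six with h2 | h2 <;>
        simp [pvBinVal, h1, h2]
  have hcol : pvBinVal (((pvBits 6 six).drop 1).take 4) = (six >>> 1) &&& 15 := by
    rw [pvBits_drop 6 1 six (by norm_num), pvBits_take (6 - 1) 4 six (by norm_num)]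
    rw [show (6 - 1 - 4 : Nat) = 1 from by norm_num, pvBinVal_bits]
    have := Nat.and_two_pow_sub_one_eq_mod (six >>> 1) 4
    norm_num at this
    rw [this]
    norm_num
  rw [hblock, hrow, hcol, hab]
  set val := ((pvSBoxes.getD i []).getD (((six >>> 5) &&& 1) * 2 + (six &&& 1)) []).getD
    ((six >>> 1) &&& 15) 0 with hvaldef
  have hvlt : val < 16 := pvSval_lt _ _ _
  have hpow : (2 : Nat) ^ (4 * (i + 1)) = 2 ^ (4 * i) * 16 := by
    rw [show 4 * (i + 1) = 4 * i + 4 from by ring, pow_add]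
    norm_num
  constructor
  · rw [pvBinFmt4_eq _ hvlt, show 4 * (i + 1) = 4 * i + 4 from by ring,
      show (16 : Nat) = 2 ^ 4 from by norm_num]
    exact (pvBits_append (4 * i) 4 b val (by norm_num [hvlt])).symm
  · omega

theorem pvFeistel_bridge (r k : Nat) :
    pvFeistelA (pvBits 32 r) (pvBits 64 k) = pvBits 32 (pvFeistelI r (k >>> 16))
      ∧ pvFeistelI r (k >>> 16) < 2 ^ 32 := by
  unfold pvFeistelA pvFeistelI
  have hE : ∀ p ∈ pvE, 1 ≤ p ∧ p ≤ 32 := pvTableBound pvE 32 (by rfl)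
  have hP : ∀ p ∈ pvP, 1 ≤ p ∧ p ≤ 32 := pvTableBound pvP 32 (by rfl)
  have h1 : pvPermuteA (pvBits 32 r) pvE = pvBits 48 (pvPermI r 32 pvE) :=
    pvPermute_bridge' r 32 48 pvE hE (by rfl)
  have htrunc : pvXorA (pvBits 48 (pvPermI r 32 pvE)) (pvBits 64 k)
      = pvXorA (pvBits 48 (pvPermI r 32 pvE)) (pvBits 48 (k >>> 16)) := by
    unfold pvXorA
    rw [pvZip_take_left _ _ (by simp [pvBits_length]), pvBits_length,
      pvBits_take 64 48 k (by norm_num)]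
  rw [h1, htrunc, pvXor_bridge]
  obtain ⟨hs, hslt⟩ := pvSbox_bridge (pvPermI r 32 pvE ^^^ k >>> 16)
  rw [hs]
  exact ⟨pvPermute_bridge' _ 32 32 pvP hP (by rfl), pvPermI_lt' _ 32 32 pvP (by rfl)⟩

theorem pvRounds_bridge (kb lb rb : Nat) (hlb : lb < 2 ^ 32) (hrb : rb < 2 ^ 32) :
    (((List.range 16).foldl (fun (lr : List Char × List Char) i =>
        (lr.2, pvXorA lr.1 (pvFeistelA lr.2 ((pvKeySchedule (pvBits 64 kb)).getD i []))))
      (pvBits 32 lb, pvBits 32 rb)).1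
        = pvBits 32 (((List.range 16).foldl
            (fun (lr : Nat × Nat) _ => (lr.2, lr.1 ^^^ pvFeistelI lr.2 (kb >>> 16))) (lb, rb)).1))
    ∧ (((List.range 16).foldl (fun (lr : List Char × List Char) i =>
        (lr.2, pvXorA lr.1 (pvFeistelA lr.2 ((pvKeySchedule (pvBits 64 kb)).getD i []))))
      (pvBits 32 lb, pvBits 32 rb)).2
        = pvBits 32 (((List.range 16).foldl
            (fun (lr : Nat × Nat) _ => (lr.2, lr.1 ^^^ pvFeistelI lr.2 (kb >>> 16))) (lb, rb)).2))
    ∧ ((List.range 16).foldl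
        (fun (lr : Nat × Nat) _ => (lr.2, lr.1 ^^^ pvFeistelI lr.2 (kb >>> 16))) (lb, rb)).1 < 2 ^ 32
    ∧ ((List.range 16).foldl
        (fun (lr : Nat × Nat) _ => (lr.2, lr.1 ^^^ pvFeistelI lr.2 (kb >>> 16))) (lb, rb)).2 < 2 ^ 32 := by
  refine pvFoldlRangeRel 16
    (fun _ (la : List Char × List Char) (nb : Nat × Nat) =>
      la.1 = pvBits 32 nb.1 ∧ la.2 = pvBits 32 nb.2 ∧ nb.1 < 2 ^ 32 ∧ nb.2 < 2 ^ 32)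
    _ _ _ _ ⟨rfl, rfl, hlb, hrb⟩ ?_
  intro i a b hi h
  obtain ⟨h1, h2, b1, b2⟩ := h
  dsimp only
  have hkey : (pvKeySchedule (pvBits 64 kb)).getD i [] = pvBits 64 kb := by
    unfold pvKeySchedule
    exact List.getD_replicate _ hi
  rw [hkey, h1, h2]
  obtain ⟨hf, hflt⟩ := pvFeistel_bridge b.2 kb
  rw [hf, pvXor_bridge]
  exact ⟨rfl, rfl, b2, Nat.xor_lt_two_pow b1 hflt⟩

theorem pvBlock_bridge (v k : Nat) :
    pvEncBlockA (pvBits 64 v) (pvBits 64 k) = pvBits 64 (pvAltBlock v (k >>> 16)) := by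
  unfold pvEncBlockA pvAltBlock
  have hIP : ∀ p ∈ pvIP, 1 ≤ p ∧ p ≤ 64 := pvTableBound pvIP 64 (by rfl)
  have hFP : ∀ p ∈ pvFP, 1 ≤ p ∧ p ≤ 64 := pvTableBound pvFP 64 (by rfl)
  dsimp only
  rw [pvPermute_bridge' v 64 64 pvIP hIP (by rfl)]
  set v' := pvPermI v 64 pvIP with hv'
  have hv'lt : v' < 2 ^ 64 := pvPermI_lt' v 64 64 pvIP (by rfl)
  have hlb : v' >>> 32 < 2 ^ 32 := by
    rw [Nat.shiftRight_eq_div_pow]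
    have : (2 : Nat) ^ 64 = 2 ^ 32 * 2 ^ 32 := by norm_num
    omega
  have hrb : v' &&& 0xFFFFFFFF < 2 ^ 32 := by
    have := Nat.and_two_pow_sub_one_eq_mod v' 32
    norm_num at this
    rw [show (0xFFFFFFFF : Nat) = 4294967295 from by norm_num, this]
    have : (2 : Nat) ^ 32 = 4294967296 := by norm_num
    omega
  have htake : (pvBits 64 v').take 32 = pvBits 32 (v' >>> 32) :=
    pvBits_take 64 32 v' (by norm_num)
  have hdrop : (pvBits 64 v').drop 32 = pvBits 32 (v' &&& 0xFFFFFFFF) := by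
    rw [pvBits_drop 64 32 v' (by norm_num)]
    have hm := Nat.and_two_pow_sub_one_eq_mod v' 32
    norm_num at hm
    rw [show ((64 : Nat) - 32) = 32 from by norm_num,
      show v' &&& 0xFFFFFFFF = v' % 2 ^ 32 from by rw [hm]; norm_num, pvBits_mod]
  rw [htake, hdrop]
  obtain ⟨hr1, hr2, hb1, hb2⟩ :=
    pvRounds_bridge k (v' >>> 32) (v' &&& 0xFFFFFFFF) hlb hrb
  set FB := (List.range 16).foldl
    (fun (lr : Nat × Nat) _ => (lr.2, lr.1 ^^^ pvFeistelI lr.2 (k >>> 16)))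
    (v' >>> 32, v' &&& 0xFFFFFFFF) with hFBdef
  rw [hr1, hr2]
  have happ := pvBits_append 32 32 FB.2 FB.1 hb1
  rw [show (32 : Nat) + 32 = 64 from by norm_num] at happ
  rw [← happ]
  exact pvPermute_bridge' _ 64 64 pvFP hFP (by rfl)

theorem pvStrToBin_bridge (l : List Char) (h : ∀ c ∈ l, c.toNat < 256) :
    (l.map (fun c => pvBinFmt 8 c.toNat)).flatten = pvBits (8 * l.length) (pvPack l) := by
  induction l using List.reverseRecOn with
  | nil => rfl
  | append_singleton t c ih =>
    rw [List.map_append, List.flatten_append,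
      ih (fun x hx => h x (List.mem_append_left _ hx))]
    have hc : c.toNat < 256 := h c (List.mem_append_right _ (List.mem_cons_self ..))
    simp only [List.map_cons, List.map_nil, List.flatten_cons, List.flatten_nil,
      List.append_nil]
    rw [pvBinFmt8_eq _ hc]
    have hpack : pvPack (t ++ [c]) = pvPack t * 256 + c.toNat := by
      unfold pvPack
      rw [List.foldl_append]
      rfl
    have hc2 : c.toNat < 2 ^ 8 := by
      rw [show (2 : Nat) ^ 8 = 256 from by norm_num]
      exact hc
    rw [hpack, show 8 * (t ++ [c]).length = 8 * t.length + 8 from by simp; ring,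
      show (256 : Nat) = 2 ^ 8 from by norm_num]
    exact (pvBits_append (8 * t.length) 8 (pvPack t) c.toNat hc2).symm

theorem pvAltBlock_lt (v sub : Nat) : pvAltBlock v sub < 2 ^ 64 := by
  unfold pvAltBlock
  dsimp only
  exact pvPermI_lt' _ 64 64 pvFP (by rfl)

-- one block: bit-string pipeline = integer pipeline
theorem pvOneBlock_bridge (bl : List Char) (kb : Nat) (hlen : bl.length = 8)
    (hc : ∀ c ∈ bl, c.toNat < 256) :
    pvHex16 (pvBinVal (pvEncBlockA (pvStrToBin bl) (pvBits 64 kb)))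
      = pvHex16 (pvAltBlock (pvPack bl) (kb >>> 16)) := by
  have hstb : pvStrToBin bl = pvBits 64 (pvPack bl) := by
    unfold pvStrToBin pvLjust8
    rw [hlen]
    norm_num
    have := pvStrToBin_bridge bl hc
    rw [this, hlen]
  rw [hstb, pvBlock_bridge, pvBinVal_bits,
    Nat.mod_eq_of_lt (by exact lt_of_lt_of_le (pvAltBlock_lt _ _) (by norm_num))]

theorem pvFlatMap_congr {α β : Type} (l : List α) (f g : α → List β)
    (h : ∀ a ∈ l, f a = g a) : l.flatMap f = l.flatMap g := by
  induction l with
  | nil => rfl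
  | cons x t ih =>
    simp only [List.flatMap_cons, h x (List.mem_cons_self ..)]
    rw [ih (fun a ha => h a (List.mem_cons_of_mem _ ha))]

theorem pvFlatMap_map {α β γ : Type} (f : α → β) (g : β → List γ) (l : List α) :
    (l.map f).flatMap g = l.flatMap (fun a => g (f a)) := by
  induction l with
  | nil => rfl
  | cons x t ih => simp only [List.map_cons, List.flatMap_cons, ih]

-- the block loop: A's index loop over range(0, len, 8) = B's chunk recursion
theorem pvLoop_bridge (kb m : Nat) : ∀ (t : List Char), t.length = 8 * m →
    (∀ c ∈ t, c.toNat < 256) →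
    (List.range m).flatMap (fun j =>
        pvHex16 (pvBinVal (pvEncBlockA (pvStrToBin ((t.drop (8 * j)).take 8)) (pvBits 64 kb))))
      = pvAltLoop t (kb >>> 16) := by
  induction m with
  | zero =>
    intro t ht hc
    have : t = [] := List.eq_nil_of_length_eq_zero (by omega)
    subst this
    simp [pvAltLoop]
  | succ m ih =>
    intro t ht hc
    have hne : t ≠ [] := by
      intro hnil
      rw [hnil] at ht
      simp at ht
    obtain ⟨c, rest, rfl⟩ := List.exists_cons_of_ne_nil hne
    simp only [List.length_cons] at ht
    have hshift : ∀ j : Nat, ((c :: rest).drop (8 * (j + 1))).take 8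
        = (((c :: rest).drop 8).drop (8 * j)).take 8 := by
      intro j
      rw [List.drop_drop, show 8 + 8 * j = 8 * (j + 1) from by ring]
    have hinner : (List.range m).flatMap (fun j =>
        pvHex16 (pvBinVal (pvEncBlockA
          (pvStrToBin (((c :: rest).drop (8 * (j + 1))).take 8)) (pvBits 64 kb))))
        = pvAltLoop ((c :: rest).drop 8) (kb >>> 16) := by
      have hlen8 : ((c :: rest).drop 8).length = 8 * m := by
        simp only [List.length_drop, List.length_cons]
        omega
      have := ih ((c :: rest).drop 8) hlen8
        (fun x hx => hc x (List.drop_subset _ _ hx))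
      rw [← this]
      apply pvFlatMap_congr
      intro j hj
      rw [hshift j]
    rw [List.range_succ_eq_map, List.flatMap_cons, pvFlatMap_map]
    simp only [Nat.succ_eq_add_one, Nat.mul_zero, List.drop_zero]
    have hblen : ((c :: rest).take 8).length = 8 := by
      simp only [List.length_take, List.length_cons]
      omega
    rw [hinner, pvOneBlock_bridge ((c :: rest).take 8) kb hblen
      (fun x hx => hc x (List.take_subset _ _ hx))]
    conv_rhs => rw [pvAltLoop]

theorem pvPyRange_chunks (m : Nat) :
    PySem.List.pyRange 0 (8 * m : Int) 8 = (List.range m).map (fun k : Nat => 8 * (k : Int)) := by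
  rw [PySem.List.pyRange_of_pos _ _ (by norm_num)]
  rcases Nat.eq_zero_or_pos m with h | h
  · subst h
    simp
  · rw [if_pos (by omega)]
    rw [show ((8 * (m : Int) - 0 + 8 - 1) / 8).toNat = m from by omega]
    apply List.map_congr_left
    intro k hk
    ring

theorem pvPyRange_chunks' (L m : Nat) (h : L = 8 * m) :
    PySem.List.pyRange 0 (L : Int) 8 = (List.range m).map (fun k : Nat => 8 * (k : Int)) := by
  subst h
  rw [show ((8 * m : Nat) : Int) = (8 * m : Int) from by push_cast; ring]
  exact pvPyRange_chunks m

-- ===== VERDICT (by name: the statement is the Claim_ definition above) =====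
theorem des_encrypt_spec : Claim_equal_des_encrypt := by
  intro text key hdom
  have hdom' := hdom
  unfold Dom_des_encrypt pvDomStr at hdom'
  rw [Bool.and_eq_true] at hdom'
  have hchars : ∀ (s : String), s.toList.all pvDomChar = true → ∀ c ∈ s.toList, c.toNat < 256 := by
    intro s hs c hcmem
    have := List.all_eq_true.mp hs c hcmem
    unfold pvDomChar at this
    simp at this
    omega
  have hta := hchars text hdom'.1
  have hka := hchars key hdom'.2
  unfold Spec_des_encrypt des_encrypt des_encrypt_alt
  dsimp only
  -- both sides work on the same padded text
  set T := pvPadA text.toList with hT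
  have hTalt : text.toList ++ List.replicate (8 - text.toList.length % 8)
      (Char.ofNat (8 - text.toList.length % 8)) = T := by
    rw [hT, pvPadA]
  rw [hTalt]
  have hTc : ∀ c ∈ T, c.toNat < 256 := by
    intro c hc
    rw [hT, pvPadA] at hc
    rcases List.mem_append.mp hc with h | h
    · exact hta c h
    · rw [List.eq_of_mem_replicate h]
      have hp : 8 - text.toList.length % 8 ≤ 8 := by omega
      set p := 8 - text.toList.length % 8 with hpd
      interval_cases p <;> decide
  have hTlen : T.length = 8 * (text.toList.length / 8 + 1) := by
    rw [hT, pvPadA]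
    simp
    omega
  -- both sides use the same 64-bit key material
  have hKeq : pvStrToBin (key.toList.take 8)
      = pvBits 64 (pvPack (key.toList.take 8
          ++ List.replicate (8 - (key.toList.take 8).length) ' ')) := by
    unfold pvStrToBin pvLjust8
    have hKc : ∀ c ∈ key.toList.take 8 ++ List.replicate (8 - (key.toList.take 8).length) ' ',
        c.toNat < 256 := by
      intro c hc
      rcases List.mem_append.mp hc with h | h
      · exact hka c (List.take_subset _ _ h)
      · rw [List.eq_of_mem_replicate h]
        decide
    have hKlen : (key.toList.take 8 ++ List.replicate (8 - (key.toList.take 8).length) ' ').length = 8 := by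
      simp
    rw [pvStrToBin_bridge _ hKc, hKlen]
  rw [hKeq]
  set KB := pvPack (key.toList.take 8 ++ List.replicate (8 - (key.toList.take 8).length) ' ') with hKB
  refine congrArg String.ofList ?_
  rw [PySem.List.foldl_append_eq_flatMap, List.nil_append]
  rw [pvPyRange_chunks' T.length (text.toList.length / 8 + 1) hTlen, pvFlatMap_map]
  refine Eq.trans (pvFlatMap_congr _ _ _ ?_)
    (pvLoop_bridge KB (text.toList.length / 8 + 1) T hTlen hTc)
  intro j hj
  rw [show ((8 * (j : Int))).toNat = 8 * j from by omega]
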